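-- pv_equiv track=rewrite | github.com/Jose-Delgadillo/IA_Practica2_Enfoques | Enfoque Lógica/Tratamiento Lógico del  Lenguaje/0007_Induccion_Gramatical.py | inducir_gramatica
-- ===== SOURCE A (Python) =====
-- corpus = [
--     ["el", "gato", "come"],
--     ["el", "perro", "ladra"],
--     ["un", "gato", "duerme"],
--     ["el", "perro", "come"],
-- ]
--
-- def inducir_gramatica(corpus):
--     # Diccionario para categorías: palabra -> categoría
--     categorias = {}
--
--     # Reglas simples por posición:
--     # posición 0: determinantes (Det)
--     # posición 1: sustantivos (N)
--     # posición 2: verbos (V)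
--
--     for oracion in corpus:
--         if len(oracion) >= 3:
--             det, sust, verbo = oracion[0], oracion[1], oracion[2]
--             categorias[det] = 'Det'
--             categorias[sust] = 'N'
--             categorias[verbo] = 'V'
--
--     # Generar reglas gramaticales básicas
--     reglas = [
--         "S -> Det N V",
--         "Det -> " + " | ".join(sorted({w for w,c in categorias.items() if c == 'Det'})),
--         "N -> " + " | ".join(sorted({w for w,c in categorias.items() if c == 'N'})),
--         "V -> " + " | ".join(sorted({w for w,c in categorias.items() if c == 'V'})),
--     ]
--
--     return reglas
-- ===== SOURCE B (Python) =====
-- def inducir_gramatica(corpus):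
--     # First pass (unchanged contract): word -> category, last write wins.
--     categorias = {}
--     for oracion in corpus:
--         if len(oracion) >= 3:
--             categorias[oracion[0]] = 'Det'
--             categorias[oracion[1]] = 'N'
--             categorias[oracion[2]] = 'V'
--     # Single grouping pass: invert the dict into category -> list of words
--     # (dict keys are unique, so each bucket already holds distinct words).
--     buckets = {}
--     for w, c in categorias.items():
--         buckets.setdefault(c, []).append(w)
--     return ["S -> Det N V"] + [
--         cat + " -> " + " | ".join(sorted(buckets.get(cat, [])))
--         for cat in ("Det", "N", "V")
--     ]
-- ===== Notes on version B (the rewrite author's own statement) =====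
-- stated objective: alternative
-- what changed: Replaces A's three separate set-comprehension scans of the categories dict by one grouping pass that inverts the dict into category buckets, then emits the three rules from the buckets in a comprehension.
import Mathlib
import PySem

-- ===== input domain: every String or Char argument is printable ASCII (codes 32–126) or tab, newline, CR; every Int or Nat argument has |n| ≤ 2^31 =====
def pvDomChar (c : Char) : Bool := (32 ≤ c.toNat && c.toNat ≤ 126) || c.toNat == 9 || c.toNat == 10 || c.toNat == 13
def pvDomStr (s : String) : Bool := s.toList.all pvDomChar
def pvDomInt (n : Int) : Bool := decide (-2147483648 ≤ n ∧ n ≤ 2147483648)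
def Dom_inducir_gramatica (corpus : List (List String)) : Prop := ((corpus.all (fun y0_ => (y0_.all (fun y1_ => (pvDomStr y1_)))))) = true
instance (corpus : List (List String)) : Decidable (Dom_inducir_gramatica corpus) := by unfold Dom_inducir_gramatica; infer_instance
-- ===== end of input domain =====

-- B replaces A's three separate set-comprehension scans of the category dict by one
-- grouping pass that inverts the dict into buckets, then emits the rules from the buckets
-- (objective: alternative decomposition, same cost).

-- ===== PORT A =====
-- A's first loop: word -> category, last write wins.
def pvCatsA (corpus : List (List String)) : PySem.Dict String String :=
  corpus.foldl (fun categorias oracion =>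
    if 3 ≤ oracion.length then
      ((categorias.insert (PySem.List.pyGetD oracion 0 "") "Det").insert
        (PySem.List.pyGetD oracion 1 "") "N").insert
        (PySem.List.pyGetD oracion 2 "") "V"
    else categorias) PySem.Dict.empty

def inducir_gramatica (corpus : List (List String)) : List String :=
  let categorias := pvCatsA corpus
  ["S -> Det N V",
   "Det -> " ++ PySem.Str.join " | "
     (PySem.List.sorted (PySem.Set.ofList
       ((categorias.items.filter (fun p => p.2 == "Det")).map Prod.fst)) (fun x => x) false),
   "N -> " ++ PySem.Str.join " | "
     (PySem.List.sorted (PySem.Set.ofList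
       ((categorias.items.filter (fun p => p.2 == "N")).map Prod.fst)) (fun x => x) false),
   "V -> " ++ PySem.Str.join " | "
     (PySem.List.sorted (PySem.Set.ofList
       ((categorias.items.filter (fun p => p.2 == "V")).map Prod.fst)) (fun x => x) false)]

-- ===== PORT B =====
-- B's identical first loop (required: last write wins must be resolved before grouping).
def pvCatsB (corpus : List (List String)) : PySem.Dict String String :=
  corpus.foldl (fun categorias oracion =>
    if 3 ≤ oracion.length then
      ((categorias.insert (PySem.List.pyGetD oracion 0 "") "Det").insert
        (PySem.List.pyGetD oracion 1 "") "N").insert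
        (PySem.List.pyGetD oracion 2 "") "V"
    else categorias) PySem.Dict.empty

def inducir_gramatica_alt (corpus : List (List String)) : List String :=
  let categorias := pvCatsB corpus
  -- buckets: category -> list of words (setdefault(c, []).append(w))
  let buckets := categorias.items.foldl
    (fun b wc => b.insert wc.2 (b.getD wc.2 [] ++ [wc.1])) PySem.Dict.empty
  "S -> Det N V" ::
    (["Det", "N", "V"].map (fun cat =>
      cat ++ " -> " ++ PySem.Str.join " | "
        (PySem.List.sorted (buckets.getD cat []) (fun x => x) false)))

-- ===== PRECONDITION & SPEC =====
def Spec_inducir_gramatica (corpus : List (List String)) (out : List String) : Prop := out = inducir_gramatica_alt corpus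
instance (corpus : List (List String)) (out : List String) : Decidable (Spec_inducir_gramatica corpus out) := by unfold Spec_inducir_gramatica; infer_instance

-- ===== CLAIM (what is proved, stated in full; the proofs are below) =====
def Claim_equal_inducir_gramatica : Prop := ∀ (corpus : List (List String)), Dom_inducir_gramatica corpus → Spec_inducir_gramatica corpus (inducir_gramatica corpus)

-- ===== LEMMAS AND PROOFS =====

-- The grouping fold's bucket for `cat` is exactly the filtered-by-category word list.
theorem pv_bucket_eq (l : List (String × String)) (b : PySem.Dict String (List String))
    (cat : String) :
    (l.foldl (fun b wc => b.insert wc.2 (b.getD wc.2 [] ++ [wc.1])) b).getD cat []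
      = b.getD cat [] ++ (l.filter (fun p => p.2 == cat)).map Prod.fst := by
  induction l generalizing b with
  | nil => simp
  | cons wc t ih =>
    simp only [List.foldl_cons, ih, List.filter_cons]
    by_cases h : wc.2 = cat
    · subst h
      simp [PySem.Dict.getD_insert_self]
    · rw [PySem.Dict.getD_insert_of_ne _ _ _ (Ne.symm h)]
      simp [h]

-- The category dict built by A's/B's first loop has distinct keys.
theorem pv_nodup_cats (corpus : List (List String)) : (pvCatsA corpus).keys.Nodup := by
  unfold pvCatsA
  generalize hd : PySem.Dict.empty = d
  have hnd : d.keys.Nodup := by subst hd; simp [PySem.Dict.empty, PySem.Dict.keys]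
  clear hd
  induction corpus generalizing d with
  | nil => exact hnd
  | cons o t ih =>
    simp only [List.foldl_cons]
    split
    · exact ih _ (PySem.Dict.nodup_keys_insert _ _ _
        (PySem.Dict.nodup_keys_insert _ _ _ (PySem.Dict.nodup_keys_insert _ _ _ hnd)))
    · exact ih _ hnd

-- For a dict with distinct keys, A's sorted set comprehension equals B's sorted bucket.
theorem pv_rule_words_eq (d : PySem.Dict String String) (hn : d.keys.Nodup) (cat : String) :
    PySem.List.sorted (PySem.Set.ofList
        ((d.items.filter (fun p => p.2 == cat)).map Prod.fst)) (fun x => x) false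
      = PySem.List.sorted
          ((d.items.foldl (fun b wc => b.insert wc.2 (b.getD wc.2 [] ++ [wc.1]))
            PySem.Dict.empty).getD cat []) (fun x => x) false := by
  have hsub : ((d.items.filter (fun p => p.2 == cat)).map Prod.fst).Sublist
      (d.items.map Prod.fst) := List.Sublist.map Prod.fst List.filter_sublist
  have hnd : ((d.items.filter (fun p => p.2 == cat)).map Prod.fst).Nodup :=
    List.Nodup.sublist hsub hn
  rw [pv_bucket_eq, PySem.Set.ofList_eq_self_of_nodup _ hnd]
  rfl

-- ===== VERDICT (by name: the statement is the Claim_ definition above) =====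
theorem inducir_gramatica_spec : Claim_equal_inducir_gramatica := by
  intro corpus _
  unfold Spec_inducir_gramatica inducir_gramatica inducir_gramatica_alt
  have hc : pvCatsB corpus = pvCatsA corpus := rfl
  rw [hc]
  have hn := pv_nodup_cats corpus
  simp only [List.map_cons, List.map_nil]
  rw [pv_rule_words_eq _ hn "Det", pv_rule_words_eq _ hn "N", pv_rule_words_eq _ hn "V"]
  rfl
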